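-- pv_equiv track=rewrite | github.com/mohanakamanooru/Python | 3 Functions and Lists/advanced_lists/RandomNumbers.py | new_modified_list
-- ===== SOURCE A (Python) =====
-- def new_modified_list(num_list):
--     mod_list=[]
--
--     num_list.sort()
--     for ind in range(0,int(len(num_list)/2)):
--         mod_list.append(num_list[ind])
--
--     mod_list.append(50)
--
--     num_list.sort()
--     for ind in range(int(len(num_list)/2),len(num_list)):
--         mod_list.append(num_list[ind])
--
--     mod_list.reverse()
--     return mod_list
-- ===== SOURCE B (Python) =====
-- def new_modified_list(num_list):
--     num_list.sort()  # keep A's in-place mutation of the argument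
--     mod_list = num_list[::-1]
--     mod_list.insert(len(num_list) - len(num_list) // 2, 50)
--     return mod_list
-- ===== Notes on version B (the rewrite author's own statement) =====
-- stated objective: simpler
-- what changed: Instead of copying the two sorted halves element-by-element around a 50 and reversing at the end (with a redundant second sort), B reverses the sorted list once and inserts 50 at the analytically derived position len - len//2.
import Mathlib
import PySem

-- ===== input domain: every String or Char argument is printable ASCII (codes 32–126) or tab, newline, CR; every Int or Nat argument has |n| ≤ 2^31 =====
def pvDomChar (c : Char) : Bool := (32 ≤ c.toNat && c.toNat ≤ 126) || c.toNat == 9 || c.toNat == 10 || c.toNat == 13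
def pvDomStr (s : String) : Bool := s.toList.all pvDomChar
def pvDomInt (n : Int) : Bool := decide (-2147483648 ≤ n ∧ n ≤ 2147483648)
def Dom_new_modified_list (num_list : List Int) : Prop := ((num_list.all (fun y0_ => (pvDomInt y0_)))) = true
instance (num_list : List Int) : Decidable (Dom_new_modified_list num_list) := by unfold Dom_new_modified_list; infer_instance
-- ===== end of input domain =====

-- B replaces A's two half-copying loops + final reverse (and redundant second sort) by one
-- slice-reverse of the sorted list plus an insertion of 50 at the closed-form index len - len//2
-- (objective: simpler). Both A and B sort the argument in place in Python; the equivalence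
-- proved here is about the return value.


-- ===== PORT A =====
def new_modified_list (num_list : List Int) : List Int :=
  -- num_list.sort() mutates the argument; the sorted list is the state from here on
  let sorted1 := PySem.List.sorted num_list (fun x => x) false
  -- int(len(num_list)/2): len ≥ 0, so float-division-then-truncation equals floor division
  let half := PySem.Int.floordiv (sorted1.length : Int) 2
  -- first loop: indices are in range, so pyGetD with default 0 is exact
  let mod1 := (PySem.List.pyRange 0 half 1).foldl
    (fun acc ind => acc ++ [PySem.List.pyGetD sorted1 ind 0]) []
  let mod2 := mod1 ++ [50]
  -- second num_list.sort()
  let sorted2 := PySem.List.sorted sorted1 (fun x => x) false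
  let mod3 := (PySem.List.pyRange half (sorted2.length : Int) 1).foldl
    (fun acc ind => acc ++ [PySem.List.pyGetD sorted2 ind 0]) mod2
  mod3.reverse

-- ===== PORT B =====
def new_modified_list_alt (num_list : List Int) : List Int :=
  let s := PySem.List.sorted num_list (fun x => x) false
  -- num_list[::-1]; step -1 is never an error, so getD [] is exact
  let mod_list := (PySem.List.slice? s none none (-1)).getD []
  PySem.List.insert mod_list ((s.length : Int) - PySem.Int.floordiv (s.length : Int) 2) 50

-- ===== PRECONDITION & SPEC =====
def Spec_new_modified_list (num_list : List Int) (out : List Int) : Prop := out = new_modified_list_alt num_list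
instance (num_list : List Int) (out : List Int) : Decidable (Spec_new_modified_list num_list out) := by unfold Spec_new_modified_list; infer_instance

-- ===== CLAIM (what is proved, stated in full; the proofs are below) =====
def Claim_equal_new_modified_list : Prop := ∀ (num_list : List Int), Dom_new_modified_list num_list → Spec_new_modified_list num_list (new_modified_list num_list)

-- ===== LEMMAS AND PROOFS =====

-- collecting s[0], …, s[k-1] is s.take k
theorem pv_map_range_getD (s : List Int) (k : Nat) (h : k ≤ s.length) :
    (List.range k).map (fun j => s.getD j 0) = s.take k := by
  induction k with
  | zero => simp
  | succ m ih =>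
    rw [List.range_succ, List.map_append, ih (by omega), List.take_add_one]
    simp [List.getD, List.getElem?_eq_getElem (by omega : m < s.length)]

-- floor of a nonnegative length over 2, as a Nat
theorem pv_half_eq (n : Nat) : PySem.Int.floordiv (n : Int) 2 = ((n / 2 : Nat) : Int) := by
  rw [PySem.Int.floordiv_eq_ediv_of_pos (by norm_num)]
  omega

theorem new_modified_list_eq (num_list : List Int) :
    new_modified_list num_list = new_modified_list_alt num_list := by
  unfold new_modified_list new_modified_list_alt
  simp only [PySem.List.sorted_sorted, PySem.List.slice?_none_none_neg_one, Option.getD_some]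
  set s := PySem.List.sorted num_list (fun x => x) false with hs
  rw [pv_half_eq]
  set k := s.length / 2 with hk
  have hkn : k ≤ s.length := Nat.div_le_self _ 2
  -- first loop collects s.take k
  have h1 : (PySem.List.pyRange 0 (k : Int) 1).foldl
      (fun acc ind => acc ++ [PySem.List.pyGetD s ind 0]) [] = s.take k := by
    rw [PySem.List.pyRange_one]
    simp only [sub_zero, Int.toNat_natCast, List.foldl_map, zero_add]
    rw [PySem.List.foldl_append_singleton_eq_map]
    simp only [PySem.List.pyGetD_natCast, List.nil_append]
    exact pv_map_range_getD s k hkn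
  -- second loop appends s.drop k
  have h2 : (PySem.List.pyRange (k : Int) (s.length : Int) 1).foldl
      (fun acc ind => acc ++ [PySem.List.pyGetD s ind 0]) (s.take k ++ [50])
      = (s.take k ++ [50]) ++ s.drop k := by
    rw [PySem.List.foldl_pyRange_pyGetD' s 0 (fun acc x => acc ++ [x]) (s.take k ++ [50])
          (Int.natCast_nonneg k),
        PySem.List.foldl_append_singleton, Int.toNat_natCast]
  rw [h1, h2]
  -- both sides as take/drop of the reversed list
  rw [show ((s.length : Int)) - ((k : Nat) : Int) = ((s.length - k : Nat) : Int) from by omega]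
  rw [PySem.List.insert_natCast s.reverse (s.length - k) 50 (by simp)]
  have hdrop : s.reverse.drop (s.length - k) = (s.take k).reverse := by
    rw [← List.reverse_take]
  have htake : s.reverse.take (s.length - k) = (s.drop k).reverse := by
    rw [← List.reverse_drop]
  rw [hdrop, htake]
  simp

-- ===== VERDICT (by name: the statement is the Claim_ definition above) =====
theorem new_modified_list_spec : Claim_equal_new_modified_list := by
  intro num_list _
  unfold Spec_new_modified_list
  exact new_modified_list_eq num_list
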